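-- pv_equiv track=rewrite | github.com/CamilaZambrano/CMP-3004-Spring2022-czambrano | cambioDeBase.py | cambioBaseDecimal
-- ===== SOURCE A (Python) =====
-- def cambioBaseDecimal(numero, base):
--     queue = []
--     suma = 0;
--
--     while numero > 0:
--         residuo = numero % 10
--         numero //= 10
--         queue.append(residuo)
--
--     for i in range(len(queue)):
--         suma += queue.pop(0)*pow(base, i)
--
--     return suma
-- ===== SOURCE B (Python) =====
-- def cambioBaseDecimal(numero, base):
--     suma = 0
--     p = 1
--     while numero > 0:
--         suma += (numero % 10) * p
--         p *= base
--         numero //= 10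
--     return suma
-- ===== Notes on version B (the rewrite author's own statement) =====
-- stated objective: simpler
-- what changed: Single loop that peels the least-significant digit and accumulates with a running power, instead of building a digit list and then evaluating it with pop(0) and pow.
import Mathlib
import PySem

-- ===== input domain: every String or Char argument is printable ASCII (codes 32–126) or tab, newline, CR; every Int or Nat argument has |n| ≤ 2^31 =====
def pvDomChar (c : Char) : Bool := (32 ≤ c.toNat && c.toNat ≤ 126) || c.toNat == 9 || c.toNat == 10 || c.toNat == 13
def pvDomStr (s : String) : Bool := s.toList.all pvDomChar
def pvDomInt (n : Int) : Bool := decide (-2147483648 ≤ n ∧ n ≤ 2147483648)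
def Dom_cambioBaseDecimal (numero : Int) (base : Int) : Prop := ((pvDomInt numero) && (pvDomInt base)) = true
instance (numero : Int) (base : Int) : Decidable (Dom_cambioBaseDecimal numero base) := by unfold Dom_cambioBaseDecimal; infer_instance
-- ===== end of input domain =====

-- B replaces A's two-phase digit-list-then-evaluate structure with one loop peeling
-- the least-significant digit into an accumulator with a running power (simpler, no list).


-- termination measure for the digit loops (stated above the ports because both cite it)
theorem pvDigitLoop_lt (n : Int) (h : 0 < n) :
    (PySem.Int.floordiv n 10).toNat < n.toNat := by
  rw [PySem.Int.floordiv_eq_ediv_of_pos (by omega)]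
  omega

-- ===== PORT A =====
-- while numero > 0: residuo = numero % 10; numero //= 10; queue.append(residuo)
def cambioBaseDecimal_build (numero : Int) : List Int :=
  if 0 < numero then
    PySem.Int.mod numero 10 :: cambioBaseDecimal_build (PySem.Int.floordiv numero 10)
  else []
termination_by numero.toNat
decreasing_by exact pvDigitLoop_lt _ (by omega)

-- for i in range(len(queue)): suma += queue.pop(0) * pow(base, i)
-- (each iteration pops the front of the queue; the loop runs len(queue) times, emptying it)
def cambioBaseDecimal_eval (base : Int) : List Int → Nat → Int → Int
  | [], _, suma => suma
  | d :: q, i, suma => cambioBaseDecimal_eval base q (i + 1) (suma + d * base ^ i)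

def cambioBaseDecimal (numero : Int) (base : Int) : Int :=
  cambioBaseDecimal_eval base (cambioBaseDecimal_build numero) 0 0

-- ===== PORT B =====
-- while numero > 0: suma += (numero % 10) * p; p *= base; numero //= 10
def cambioBaseDecimal_alt_go (base : Int) (numero p suma : Int) : Int :=
  if 0 < numero then
    cambioBaseDecimal_alt_go base (PySem.Int.floordiv numero 10) (p * base)
      (suma + PySem.Int.mod numero 10 * p)
  else suma
termination_by numero.toNat
decreasing_by exact pvDigitLoop_lt _ (by omega)

def cambioBaseDecimal_alt (numero : Int) (base : Int) : Int :=
  cambioBaseDecimal_alt_go base numero 1 0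

-- ===== PRECONDITION & SPEC =====
def Spec_cambioBaseDecimal (numero : Int) (base : Int) (out : Int) : Prop := out = cambioBaseDecimal_alt numero base
instance (numero : Int) (base : Int) (out : Int) : Decidable (Spec_cambioBaseDecimal numero base out) := by unfold Spec_cambioBaseDecimal; infer_instance

-- ===== CLAIM (what is proved, stated in full; the proofs are below) =====
def Claim_equal_cambioBaseDecimal : Prop := ∀ (numero : Int) (base : Int), Dom_cambioBaseDecimal numero base → Spec_cambioBaseDecimal numero base (cambioBaseDecimal numero base)

-- ===== LEMMAS AND PROOFS =====

-- loop fusion: evaluating A's queue from index i with accumulator s equals B's fused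
-- loop started at power p = base ^ i.
theorem eval_build_eq_go (base : Int) (numero : Int) :
    ∀ (i : Nat) (s : Int),
      cambioBaseDecimal_eval base (cambioBaseDecimal_build numero) i s =
        cambioBaseDecimal_alt_go base numero (base ^ i) s := by
  induction numero using cambioBaseDecimal_build.induct with
  | case1 n h ih =>
      intro i s
      rw [cambioBaseDecimal_build, if_pos h, cambioBaseDecimal_eval,
        cambioBaseDecimal_alt_go, if_pos h, ih, pow_succ]
  | case2 n h =>
      intro i s
      rw [cambioBaseDecimal_build, if_neg h, cambioBaseDecimal_eval,
        cambioBaseDecimal_alt_go, if_neg h]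

-- ===== VERDICT (by name: the statement is the Claim_ definition above) =====
theorem cambioBaseDecimal_spec : Claim_equal_cambioBaseDecimal := by
  intro numero base _
  unfold Spec_cambioBaseDecimal cambioBaseDecimal cambioBaseDecimal_alt
  simpa using eval_build_eq_go base numero 0 0
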